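-- pv_equiv track=rewrite | github.com/Artasam/LinkedIn_Post_Automation_Agent | agents/content_agent.py | _ensure_paragraph_spacing
-- ===== SOURCE A (Python) =====
-- def _ensure_paragraph_spacing(text: str) -> str:
--     """Ensure every paragraph is separated by a blank line."""
--     lines = text.split("\n")
--     paragraphs = []
--     current = []
--     for line in lines:
--         stripped = line.strip()
--         if stripped:
--             current.append(stripped)
--         else:
--             if current:
--                 paragraphs.append(" ".join(current))
--                 current = []
--     if current:
--         paragraphs.append(" ".join(current))
--     return "\n\n".join(paragraphs)
-- ===== SOURCE B (Python) =====
-- def _ensure_paragraph_spacing(text: str) -> str: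
--     """Ensure every paragraph is separated by a blank line."""
--     lines = [l.strip() for l in text.split("\n")]
--     n = len(lines)
--     paragraphs = []
--     i = 0
--     while i < n:
--         if not lines[i]:
--             i += 1
--         else:
--             j = i + 1
--             while j < n and lines[j]:
--                 j += 1
--             paragraphs.append(" ".join(lines[i:j]))
--             i = j
--     return "\n\n".join(paragraphs)
-- ===== Notes on version B (the rewrite author's own statement) =====
-- stated objective: idiomatic
-- what changed: B pre-strips all lines once and builds paragraphs by span/group runs of consecutive non-blank lines (groupby style), replacing A's mutable current-accumulator with its end-of-loop flush.
import Mathlib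
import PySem

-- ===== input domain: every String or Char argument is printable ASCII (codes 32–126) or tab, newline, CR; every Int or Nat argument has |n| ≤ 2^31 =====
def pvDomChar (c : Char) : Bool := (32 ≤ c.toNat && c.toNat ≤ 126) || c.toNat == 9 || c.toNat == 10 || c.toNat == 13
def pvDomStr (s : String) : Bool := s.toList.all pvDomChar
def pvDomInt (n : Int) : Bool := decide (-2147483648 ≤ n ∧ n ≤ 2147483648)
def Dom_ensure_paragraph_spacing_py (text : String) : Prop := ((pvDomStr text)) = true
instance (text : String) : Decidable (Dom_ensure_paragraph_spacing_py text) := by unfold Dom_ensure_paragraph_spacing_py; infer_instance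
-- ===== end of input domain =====

-- B strips all lines once up front and then emits one paragraph per maximal run of
-- non-blank lines (idiomatic span/groupby style), instead of A's accumulator with an
-- end-of-loop flush. Same return value; no speed claim.

-- ===== PORT A =====
-- the for-loop of A, state = (paragraphs, current), one step per line
def pvALoop : List String → List String → List String → List String × List String
  | [], paragraphs, current => (paragraphs, current)
  | line :: rest, paragraphs, current =>
    let stripped := PySem.Str.strip line
    if stripped ≠ "" then
      pvALoop rest paragraphs (current ++ [stripped])
    else if current ≠ [] then
      pvALoop rest (paragraphs ++ [PySem.Str.join " " current]) []
    else
      pvALoop rest paragraphs current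

def ensure_paragraph_spacing_py (text : String) : String :=
  let lines := ((PySem.Str.split? text "\n").getD [])
  let st := pvALoop lines [] []
  let paragraphs := if st.2 ≠ [] then st.1 ++ [PySem.Str.join " " st.2] else st.1
  PySem.Str.join "\n\n" paragraphs

-- ===== PORT B =====
-- B's while loop over the pre-stripped lines: skip a blank line, or take the whole
-- non-blank run lines[i:j] as one paragraph and jump to j (takeWhile/dropWhile)
def pvBGroups : List String → List String
  | [] => []
  | l :: ls =>
    if l = "" then pvBGroups ls
    else PySem.Str.join " " (l :: ls.takeWhile (· ≠ "")) :: pvBGroups (ls.dropWhile (· ≠ ""))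
termination_by l => l.length
decreasing_by
  · simp
  · exact Nat.lt_succ_of_le (List.length_dropWhile_le _ _)

def ensure_paragraph_spacing_py_alt (text : String) : String :=
  let lines := (((PySem.Str.split? text "\n").getD [])).map PySem.Str.strip
  PySem.Str.join "\n\n" (pvBGroups lines)

-- ===== PRECONDITION & SPEC =====
def Spec_ensure_paragraph_spacing_py (text : String) (out : String) : Prop := out = ensure_paragraph_spacing_py_alt text
instance (text : String) (out : String) : Decidable (Spec_ensure_paragraph_spacing_py text out) := by unfold Spec_ensure_paragraph_spacing_py; infer_instance

-- ===== CLAIM (what is proved, stated in full; the proofs are below) =====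
def Claim_equal_ensure_paragraph_spacing_py : Prop := ∀ (text : String), Dom_ensure_paragraph_spacing_py text → Spec_ensure_paragraph_spacing_py text (ensure_paragraph_spacing_py text)

-- ===== LEMMAS AND PROOFS =====

-- A's loop restructured to produce the paragraph list directly (flush folded in)
def pvAGroups : List String → List String → List String
  | current, [] => if current ≠ [] then [PySem.Str.join " " current] else []
  | current, line :: rest =>
    let stripped := PySem.Str.strip line
    if stripped ≠ "" then pvAGroups (current ++ [stripped]) rest
    else if current ≠ [] then PySem.Str.join " " current :: pvAGroups [] rest
    else pvAGroups [] rest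

theorem pvALoop_flush (lines : List String) : ∀ (paragraphs current : List String),
    (if (pvALoop lines paragraphs current).2 ≠ [] then
      (pvALoop lines paragraphs current).1 ++ [PySem.Str.join " " (pvALoop lines paragraphs current).2]
    else (pvALoop lines paragraphs current).1) = paragraphs ++ pvAGroups current lines := by
  induction lines with
  | nil =>
    intro paragraphs current
    by_cases h : current = [] <;> simp [pvALoop, pvAGroups, h]
  | cons line rest ih =>
    intro paragraphs current
    by_cases h1 : PySem.Str.strip line = ""
    · by_cases h2 : current = []
      · subst h2
        simp only [pvALoop, pvAGroups, h1, ne_eq, not_true_eq_false, if_false]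
        simpa using ih paragraphs []
      · simp only [pvALoop, pvAGroups, h1, ne_eq, not_true_eq_false, if_false, h2,
          not_false_eq_true, reduceIte]
        rw [ih (paragraphs ++ [PySem.Str.join " " current]) []]
        simp
    · simp only [pvALoop, pvAGroups, ne_eq, h1, not_false_eq_true, reduceIte]
      exact ih paragraphs (current ++ [PySem.Str.strip line])

theorem pvAGroups_eq_bGroups (lines : List String) :
    (∀ current, current ≠ [] →
      pvAGroups current lines =
        PySem.Str.join " " (current ++ (lines.map PySem.Str.strip).takeWhile (· ≠ "")) ::
          pvBGroups ((lines.map PySem.Str.strip).dropWhile (· ≠ ""))) ∧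
    pvAGroups [] lines = pvBGroups (lines.map PySem.Str.strip) := by
  induction lines with
  | nil =>
    refine ⟨fun current hc => ?_, ?_⟩
    · simp [pvAGroups, pvBGroups, hc]
    · simp [pvAGroups, pvBGroups]
  | cons line rest ih =>
    have hmain : ∀ current, current ≠ [] →
        pvAGroups current (line :: rest) =
          PySem.Str.join " " (current ++ ((line :: rest).map PySem.Str.strip).takeWhile (· ≠ "")) ::
            pvBGroups (((line :: rest).map PySem.Str.strip).dropWhile (· ≠ "")) := by
      intro current hc
      by_cases hl : PySem.Str.strip line = ""
      · simp only [pvAGroups, hl, ne_eq, not_true_eq_false, if_false, hc, not_false_eq_true,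
          List.map_cons, List.takeWhile_cons, List.dropWhile_cons, decide_false,
          Bool.false_eq_true, List.append_nil]
        rw [ih.2]
        simp [pvBGroups]
      · simp only [pvAGroups, ne_eq, hl, not_false_eq_true, reduceIte, List.map_cons,
          List.takeWhile_cons, List.dropWhile_cons, decide_true]
        rw [ih.1 (current ++ [PySem.Str.strip line]) (by simp)]
        simp
    refine ⟨hmain, ?_⟩
    by_cases hl : PySem.Str.strip line = ""
    · simp only [pvAGroups, hl, ne_eq, not_true_eq_false, if_false,
        List.map_cons]
      rw [ih.2]
      simp [pvBGroups]
    · simp only [pvAGroups, ne_eq, hl, not_false_eq_true, List.map_cons,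
        List.nil_append]
      rw [ih.1 [PySem.Str.strip line] (by simp)]
      simp [pvBGroups, hl]

-- ===== VERDICT (by name: the statement is the Claim_ definition above) =====
theorem ensure_paragraph_spacing_py_spec : Claim_equal_ensure_paragraph_spacing_py := by
  intro text _
  unfold Spec_ensure_paragraph_spacing_py ensure_paragraph_spacing_py ensure_paragraph_spacing_py_alt
  simp only []
  rw [pvALoop_flush, (pvAGroups_eq_bGroups _).2]
  simp
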